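-- pv_equiv track=rewrite | github.com/johannespaju/2024-fall-python | PROJECT/project1/phone_numbers.py | remove_unnecessary_chars
-- ===== SOURCE A (Python) =====
-- def remove_unnecessary_chars(number: str) -> str:
--     """Remove unnecessary characters from phone number."""
--     country_code = number.split(" ", 1)[0]
--
--     def is_country_code_valid(country_code) -> bool:
--         """Check if country code is valid."""
--         country_code = number.split(" ", 1)[0]
--         return number.startswith("+") and any(char.isnumeric() for char in country_code) and " " in number
--
--     has_country_code = is_country_code_valid(country_code)
--
--     new_number = ""
--     number_of_plus = 0
--     number_of_space = 0
--
--     if has_country_code: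
--         for char in number:
--             if number_of_plus == 0:
--                 new_number += char
--                 number_of_plus += 1
--             elif char.isnumeric():
--                 new_number += char
--             elif char == " " and number_of_space == 0:
--                 number_of_space += 1
--                 new_number += char
--
--     else:
--         for char in number:
--             if char.isnumeric():
--                 new_number += char
--
--     return new_number
-- ===== SOURCE B (Python) =====
-- def remove_unnecessary_chars(number: str) -> str:
--     """Remove unnecessary characters from phone number."""
--     country_code = number.split(" ", 1)[0]
--     has_country_code = (number.startswith("+")
--                         and any(c.isnumeric() for c in country_code)
--                         and " " in number)
--     if not has_country_code:
--         return "".join(c for c in number if c.isnumeric())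
--     idx = number.index(" ")
--     head = "".join(c for c in number[1:idx] if c.isnumeric())
--     tail = "".join(c for c in number[idx + 1:] if c.isnumeric())
--     return number[0] + head + " " + tail
-- ===== Notes on version B (the rewrite author's own statement) =====
-- stated objective: simpler
-- what changed: Instead of one stateful pass threading number_of_plus/number_of_space counters, B splits the country-code case at the index of the first space and filters the digit characters of each segment separately with comprehensions.
import Mathlib
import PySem

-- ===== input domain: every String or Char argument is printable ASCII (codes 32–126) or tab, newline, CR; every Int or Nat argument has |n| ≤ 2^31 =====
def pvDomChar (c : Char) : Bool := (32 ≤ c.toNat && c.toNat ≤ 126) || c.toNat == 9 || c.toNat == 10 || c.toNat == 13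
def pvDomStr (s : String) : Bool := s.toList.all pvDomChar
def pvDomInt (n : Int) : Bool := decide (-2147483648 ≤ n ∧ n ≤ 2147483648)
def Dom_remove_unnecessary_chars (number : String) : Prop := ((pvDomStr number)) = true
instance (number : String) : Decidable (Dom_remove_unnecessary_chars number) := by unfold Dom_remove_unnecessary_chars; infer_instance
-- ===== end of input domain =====

-- B keeps the same country-code predicate but splits the country-code case at the first space and
-- filters each segment separately, instead of threading plus/space counters through one stateful pass.
-- char.isnumeric() is ported as PySem.Chars.isdigit — exact on the ASCII input domain.

-- ===== PORT A =====
-- one step of A's country-code loop body, on state (new_number, number_of_plus, number_of_space)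
def pvAStep (st : List Char × Nat × Nat) (ch : Char) : List Char × Nat × Nat :=
  if st.2.1 == 0 then (st.1 ++ [ch], st.2.1 + 1, st.2.2)
  else if PySem.Chars.isdigit ch then (st.1 ++ [ch], st.2.1, st.2.2)
  else if ch == ' ' && st.2.2 == 0 then (st.1 ++ [ch], st.2.1, st.2.2 + 1)
  else st

def remove_unnecessary_chars (number : String) : String :=
  -- number.split(" ", 1)[0]: the separator is non-empty and split never returns [], so getD is exact
  let country_code := ((PySem.Str.splitMax? number " " 1).getD []).getD 0 ""
  let has_country_code := PySem.Str.startswith number "+"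
      && country_code.toList.any PySem.Chars.isdigit && PySem.Str.isIn " " number
  if has_country_code then
    String.ofList (number.toList.foldl pvAStep ([], 0, 0)).1
  else
    String.ofList (number.toList.foldl
      (fun acc ch => if PySem.Chars.isdigit ch then acc ++ [ch] else acc) [])

-- ===== PORT B =====
def remove_unnecessary_chars_alt (number : String) : String :=
  let cs := number.toList
  let country_code := ((PySem.Str.splitMax? number " " 1).getD []).getD 0 ""
  let has_country_code := PySem.Str.startswith number "+"
      && country_code.toList.any PySem.Chars.isdigit && PySem.Str.isIn " " number
  if !has_country_code then String.ofList (cs.filter PySem.Chars.isdigit)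
  else
    -- in this branch number contains " " and starts with "+": number.index(" ") = find ≥ 0,
    -- number[0] = cs.take 1, and the slices number[1:idx] / number[idx+1:] have non-negative
    -- bounds, so they are exactly drop/take (PySem.List.slice_toNat)
    let idx := (PySem.Chars.find cs [' ']).toNat
    let head := ((cs.drop 1).take (idx - 1)).filter PySem.Chars.isdigit
    let tail := (cs.drop (idx + 1)).filter PySem.Chars.isdigit
    String.ofList (cs.take 1 ++ head ++ ' ' :: tail)

-- ===== PRECONDITION & SPEC =====
def Spec_remove_unnecessary_chars (number : String) (out : String) : Prop := out = remove_unnecessary_chars_alt number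
instance (number : String) (out : String) : Decidable (Spec_remove_unnecessary_chars number out) := by unfold Spec_remove_unnecessary_chars; infer_instance

-- ===== CLAIM (what is proved, stated in full; the proofs are below) =====
def Claim_equal_remove_unnecessary_chars : Prop := ∀ (number : String), Dom_remove_unnecessary_chars number → Spec_remove_unnecessary_chars number (remove_unnecessary_chars number)

-- ===== LEMMAS AND PROOFS =====

-- the first occurrence of c in u ++ c :: v with c ∉ u is at index u.length
theorem pv_find_singleton (u v : List Char) (c : Char) (hu : c ∉ u) :
    PySem.Chars.find (u ++ c :: v) [c] = (u.length : Int) := by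
  have hmem : c ∈ u ++ c :: v := by simp
  have hnn : 0 ≤ PySem.Chars.find (u ++ c :: v) [c] := by
    rw [PySem.Chars.find_nonneg_iff]
    exact (List.singleton_infix_iff c _).mpr hmem
  obtain ⟨hpre, hmin⟩ := PySem.Chars.find_spec hnn
  set n := (PySem.Chars.find (u ++ c :: v) [c]).toNat with hn
  have hne : n = u.length := by
    by_contra hne
    rcases Nat.lt_or_ge n u.length with hlt | hge
    · -- drop n starts inside u, whose head is u[n] ≠ c
      rcases (List.prefix_iff_eq_take.mp hpre) with heq
      have hdrop : (u ++ c :: v).drop n = u.drop n ++ c :: v := by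
        rw [List.drop_append_of_le_length (Nat.le_of_lt hlt)]
      have hhead : ((u ++ c :: v).drop n).head? = some u[n] := by
        rw [hdrop]
        have : (u.drop n).head? = some u[n] := by
          rw [List.head?_drop]; simp
        cases hd : u.drop n with
        | nil => simp [hd] at this
        | cons a t => simp [hd] at this ⊢; exact this
      have : u[n] = c := by
        rcases hpre with ⟨t, ht⟩
        have : ((u ++ c :: v).drop n).head? = some c := by rw [← ht]; simp
        rw [hhead] at this; exact (Option.some_inj.mp this)
      exact hu (this ▸ List.getElem_mem hlt)
    · have hlt2 : u.length < n := lt_of_le_of_ne hge (fun h => hne h.symm)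
      have : ¬ [c] <+: (u ++ c :: v).drop u.length := hmin u.length hlt2
      rw [List.drop_append_of_le_length (le_refl _)] at this
      simp at this
  omega

-- A's country-code loop once number_of_space = 1: only the digit branch can fire
theorem pv_loop_after_space (l : List Char) (acc : List Char) :
    l.foldl pvAStep (acc, 1, 1) = (acc ++ l.filter PySem.Chars.isdigit, 1, 1) := by
  induction l generalizing acc with
  | nil => simp
  | cons ch t ih =>
    by_cases hd : PySem.Chars.isdigit ch
    · simp [pvAStep, hd, ih]
    · simp [pvAStep, hd, ih]

-- A's country-code loop with number_of_plus = 1, number_of_space = 0, on u ++ ' ' :: v with no space in u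
theorem pv_loop_before_space (u : List Char) (hu : (' ' : Char) ∉ u) (v acc : List Char) :
    (u ++ ' ' :: v).foldl pvAStep (acc, 1, 0)
      = (acc ++ u.filter PySem.Chars.isdigit ++ ' ' :: v.filter PySem.Chars.isdigit, 1, 1) := by
  induction u generalizing acc with
  | nil =>
    have : ¬ PySem.Chars.isdigit ' ' := by decide
    simp [pvAStep, this, pv_loop_after_space]
  | cons ch t ih =>
    have hch : ch ≠ ' ' := fun h => hu (h ▸ List.mem_cons_self)
    have ht : (' ' : Char) ∉ t := fun h => hu (List.mem_cons_of_mem _ h)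
    by_cases hd : PySem.Chars.isdigit ch
    · simp [pvAStep, hd, ih ht]
    · simp [pvAStep, hd, hch, ih ht]

-- ===== VERDICT (by name: the statement is the Claim_ definition above) =====
theorem remove_unnecessary_chars_spec : Claim_equal_remove_unnecessary_chars := by
  intro number _
  show remove_unnecessary_chars number = remove_unnecessary_chars_alt number
  unfold remove_unnecessary_chars remove_unnecessary_chars_alt
  set cc := ((PySem.Str.splitMax? number " " 1).getD []).getD 0 "" with hcc
  by_cases h : (PySem.Str.startswith number "+"
      && cc.toList.any PySem.Chars.isdigit && PySem.Str.isIn " " number) = true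
  · -- country-code branch
    simp only [h, if_true, Bool.not_true, Bool.false_eq_true, if_false]
    obtain ⟨hsw, hin⟩ : PySem.Str.startswith number "+" = true ∧ PySem.Str.isIn " " number = true := by
      constructor <;> simp_all
    -- number starts with '+'
    have hpre : ('+' : Char) :: [] <+: number.toList := by
      have := (PySem.Chars.startswith_iff number.toList "+".toList).mp (by simpa using hsw)
      simpa using this
    obtain ⟨t, ht⟩ := hpre
    -- number contains a space, in t (its head is '+')
    have hsp : (' ' : Char) ∈ number.toList := by
      have := (PySem.Chars.isIn_iff_infix " ".toList number.toList).mp (by simpa using hin)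
      exact (List.singleton_infix_iff _ _).mp (by simpa using this)
    have hspt : (' ' : Char) ∈ t := by
      rw [← ht] at hsp; simpa using hsp
    -- split t at the first space
    set u := t.takeWhile (fun c => !(c == ' ')) with hu
    set w := t.dropWhile (fun c => !(c == ' ')) with hw
    have hwne : w ≠ [] := by
      intro hnil
      have htu : t = u := by
        have h3 := List.takeWhile_append_dropWhile (p := fun c => !(c == ' ')) (l := t)
        rw [← hu, ← hw, hnil, List.append_nil] at h3
        exact h3.symm
      rw [htu, hu] at hspt
      have := List.mem_takeWhile_imp hspt
      simp at this
    obtain ⟨a, v, hav⟩ := List.exists_cons_of_ne_nil hwne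
    have hv : w = ' ' :: v := by
      have hda : List.dropWhile (fun c => !(c == ' ')) t = a :: v := by rw [← hw]; exact hav
      have h2 := List.head_dropWhile_not (fun c => !(c == ' ')) (l := t) (by simp [hda])
      simp [hda] at h2
      rw [hav, h2]
    have huns : (' ' : Char) ∉ u := by
      intro hm
      have := List.mem_takeWhile_imp hm
      simp at this
    have htuv : t = u ++ ' ' :: v := by
      rw [hu, ← hv, hw, List.takeWhile_append_dropWhile]
    -- the index of the first space
    have hfind : PySem.Chars.find number.toList [' '] = ((('+' :: u).length : Nat) : Int) := by
      rw [← ht, htuv]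
      exact pv_find_singleton ('+' :: u) v ' ' (by simp [huns])
    have hA : (number.toList.foldl pvAStep ([], 0, 0)).1
        = '+' :: u.filter PySem.Chars.isdigit ++ ' ' :: v.filter PySem.Chars.isdigit := by
      rw [← ht, htuv]
      rw [show (['+'] ++ (u ++ ' ' :: v) : List Char) = '+' :: (u ++ ' ' :: v) from rfl,
          List.foldl_cons, show pvAStep ([], 0, 0) '+' = (['+'], 1, 0) from rfl,
          pv_loop_before_space u huns v ['+']]
      simp
    rw [hA, hfind, ← ht, htuv]
    simp [List.take_append, List.drop_append, List.drop_eq_nil_of_le]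
  · -- plain branch: A's accumulate-if fold is filter
    simp only [h, Bool.not_false, if_true]
    have h4 := PySem.List.foldl_append_if PySem.Chars.isdigit id number.toList []
    exact congrArg String.ofList (by simpa using h4)
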